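-- pv_equiv track=rewrite | github.com/Merdogalicous/nttv_sensei_ai | extractors/kamae.py | _split_row_limited
-- ===== SOURCE A (Python) =====
-- from typing import Any, Dict, List, Optional
--
-- EXPECTED_COLS = 12
--
-- def _split_row_limited(raw: str) -> List[str]:
--     parts = raw.split(",", EXPECTED_COLS - 1)
--     parts = [part.strip() for part in parts]
--     if len(parts) > EXPECTED_COLS:
--         head = parts[: EXPECTED_COLS - 1]
--         tail = ",".join(parts[EXPECTED_COLS - 1 :])
--         parts = head + [tail]
--     if len(parts) < EXPECTED_COLS:
--         parts += [""] * (EXPECTED_COLS - len(parts))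
--     return parts
-- ===== SOURCE B (Python) =====
-- from typing import List
--
-- EXPECTED_COLS = 12
--
-- def _split_row_limited(raw: str) -> List[str]:
--     fields = []
--     s = raw
--     for _ in range(EXPECTED_COLS - 1):
--         head, _, s = s.partition(",")
--         fields.append(head.strip())
--     fields.append(s.strip())
--     return fields
-- ===== Notes on version B (the rewrite author's own statement) =====
-- stated objective: simpler
-- what changed: Replaces split-with-maxsplit plus a dead overflow branch and an explicit padding branch by 11 str.partition steps whose empty-remainder behaviour pads missing fields automatically.
import Mathlib
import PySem

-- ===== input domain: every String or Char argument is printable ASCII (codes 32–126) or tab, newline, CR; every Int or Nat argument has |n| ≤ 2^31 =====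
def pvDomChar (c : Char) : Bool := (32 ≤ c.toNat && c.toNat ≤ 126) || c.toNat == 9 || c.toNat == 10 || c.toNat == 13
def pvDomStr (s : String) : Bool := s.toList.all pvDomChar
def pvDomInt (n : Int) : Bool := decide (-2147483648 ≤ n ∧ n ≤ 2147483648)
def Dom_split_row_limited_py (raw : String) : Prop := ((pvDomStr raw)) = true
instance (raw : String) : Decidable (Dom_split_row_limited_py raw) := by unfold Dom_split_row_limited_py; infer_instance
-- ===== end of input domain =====

-- B replaces split-with-maxsplit plus padding/overflow branches by 11 partition steps
-- whose empty-remainder behaviour pads missing fields automatically (objective: simpler).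

-- ===== PORT A =====
def split_row_limited_py (raw : String) : List String :=
  -- parts = raw.split(",", 11): sep "," is nonempty, so split never raises; getD default unreached
  let parts := (PySem.Str.splitMax? raw "," (12 - 1)).getD []
  let parts := parts.map PySem.Str.strip
  let parts :=
    if parts.length > 12 then
      parts.take (12 - 1) ++ [PySem.Str.join "," (parts.drop (12 - 1))]
    else parts
  if parts.length < 12 then parts ++ List.replicate (12 - parts.length) "" else parts

-- ===== PORT B =====
-- exact hand port of `head, _, s = s.partition(",")`: returns (before-first-comma, after);
-- the second component is [] when there is no comma, exactly as Python leaves s = ''.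
def bPartition : List Char → List Char × List Char
  | [] => ([], [])
  | c :: rest =>
      if c = ',' then ([], rest)
      else
        let p := bPartition rest
        (c :: p.1, p.2)

-- the `for _ in range(11)` loop of B, plus the final append of the stripped remainder
def bGo : Nat → List Char → List (List Char)
  | 0, s => [PySem.Chars.strip s]
  | n + 1, s =>
      let p := bPartition s
      PySem.Chars.strip p.1 :: bGo n p.2

def split_row_limited_py_alt (raw : String) : List String :=
  (bGo (12 - 1) raw.toList).map String.ofList

-- ===== PRECONDITION & SPEC =====
def Spec_split_row_limited_py (raw : String) (out : List String) : Prop := out = split_row_limited_py_alt raw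
instance (raw : String) (out : List String) : Decidable (Spec_split_row_limited_py raw out) := by unfold Spec_split_row_limited_py; infer_instance

-- ===== CLAIM (what is proved, stated in full; the proofs are below) =====
def Claim_equal_split_row_limited_py : Prop := ∀ (raw : String), Dom_split_row_limited_py raw → Spec_split_row_limited_py raw (split_row_limited_py raw)

-- ===== LEMMAS AND PROOFS =====

-- A's limited split, characterised recursively via bPartition
def mySplit : Nat → List Char → List (List Char)
  | 0, s => [s]
  | n + 1, s =>
      if ',' ∈ s then (bPartition s).1 :: mySplit n (bPartition s).2 else [s]

def consHead (p : List Char) : List (List Char) → List (List Char)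
  | [] => []
  | x :: r => (p ++ x) :: r

theorem bPartition_no_comma (s : List Char) (h : ',' ∉ s) : bPartition s = (s, []) := by
  induction s with
  | nil => rfl
  | cons c rest ih =>
      simp only [List.mem_cons, not_or] at h
      simp [bPartition, Ne.symm h.1, ih h.2]

theorem mySplit_ne_nil (m : Nat) (s : List Char) : mySplit m s ≠ [] := by
  cases m with
  | zero => simp [mySplit]
  | succ n =>
      simp only [mySplit]
      split <;> simp

theorem consHead_nil_of_ne_nil (xs : List (List Char)) (h : xs ≠ []) : consHead [] xs = xs := by
  cases xs with
  | nil => exact absurd rfl h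
  | cons x r => simp [consHead]

theorem consHead_consHead (p q : List Char) (xs : List (List Char)) :
    consHead p (consHead q xs) = consHead (p ++ q) xs := by
  cases xs <;> simp [consHead]

theorem mySplit_cons (k : Nat) (c : Char) (rest : List Char) (hc : c ≠ ',') :
    mySplit (k + 1) (c :: rest) = consHead [c] (mySplit (k + 1) rest) := by
  by_cases h : ',' ∈ rest
  · have hmem : ',' ∈ c :: rest := List.mem_cons_of_mem _ h
    simp [mySplit, hmem, h, bPartition, hc, consHead]
  · have hmem : ',' ∉ c :: rest := by
      simp only [List.mem_cons, not_or]
      exact ⟨Ne.symm hc, h⟩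
    simp [mySplit, hmem, h, consHead]

theorem mySplit_length (m : Nat) (s : List Char) : (mySplit m s).length ≤ m + 1 := by
  induction m generalizing s with
  | zero => simp [mySplit]
  | succ n ih =>
      simp only [mySplit]
      split
      · simpa using Nat.succ_le_succ (ih _)
      · simp

theorem go_eq_mySplit (fuel : Nat) : ∀ (l : List Char), l.length ≤ fuel →
    ∀ (m : Nat) (cur : List Char) (acc : List (List Char)),
      PySem.Chars.splitOnMax.go [','] fuel m l cur acc =
        acc.reverse ++ consHead cur.reverse (mySplit m l) := by
  induction fuel with
  | zero =>
      intro l hl m cur acc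
      have : l = [] := List.eq_nil_of_length_eq_zero (Nat.le_zero.mp hl)
      subst this
      cases m with
      | zero => simp [PySem.Chars.splitOnMax.go, mySplit, consHead]
      | succ n => simp [PySem.Chars.splitOnMax.go, mySplit, consHead]
  | succ fuel ih =>
      intro l hl m cur acc
      cases l with
      | nil =>
          cases m with
          | zero => simp [PySem.Chars.splitOnMax.go, mySplit, consHead]
          | succ n => simp [PySem.Chars.splitOnMax.go, mySplit, consHead]
      | cons c rest =>
          have hrest : rest.length ≤ fuel := by
            simpa using Nat.succ_le_succ_iff.mp hl
          cases m with
          | zero =>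
              simp [PySem.Chars.splitOnMax.go, mySplit, consHead]
          | succ k =>
              by_cases hc : c = ','
              · subst hc
                have hpre : List.isPrefixOf [','] (',' :: rest) = true := by
                  simp [List.isPrefixOf]
                simp only [PySem.Chars.splitOnMax.go, hpre, if_true, Nat.succ_ne_zero,
                  if_false, List.length_cons, List.drop_succ_cons, List.drop_zero,
                  Nat.add_sub_cancel, List.length_nil, List.drop_zero]
                rw [ih rest hrest k [] (cur.reverse :: acc)]
                have hmem : ',' ∈ ',' :: rest := List.mem_cons_self
                simp only [mySplit, hmem, if_true, bPartition, consHead,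
                  List.reverse_cons, List.append_assoc, List.singleton_append]
                cases hms : mySplit k rest with
                | nil => exact absurd hms (mySplit_ne_nil k rest)
                | cons x r => simp
              · have hpre : List.isPrefixOf [','] (c :: rest) = false := by
                  simp [List.isPrefixOf, Ne.symm hc]
                simp only [PySem.Chars.splitOnMax.go, hpre, Nat.succ_ne_zero, if_false,
                  Bool.false_eq_true]
                rw [ih rest hrest (k + 1) (c :: cur) acc]
                rw [mySplit_cons k c rest hc, consHead_consHead]
                simp

theorem splitOnMax_eq (s : List Char) :
    PySem.Chars.splitOnMax s [','] 11 = mySplit 11 s := by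
  have h : PySem.Chars.splitOnMax s [','] 11 =
      PySem.Chars.splitOnMax.go [','] (s.length + 1) 11 s [] [] := by
    simp [PySem.Chars.splitOnMax]
  rw [h, go_eq_mySplit (s.length + 1) s (Nat.le_succ _) 11 [] []]
  simp [consHead_nil_of_ne_nil _ (mySplit_ne_nil 11 s)]

theorem strip_nil : PySem.Chars.strip [] = [] := by decide

-- B's loop computes exactly the padded-then-stripped limited split
theorem bGo_eq (n : Nat) : ∀ s : List Char,
    bGo n s =
      (mySplit n s ++ List.replicate (n + 1 - (mySplit n s).length) []).map
        PySem.Chars.strip := by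
  induction n with
  | zero => intro s; simp [bGo, mySplit]
  | succ n ih =>
      intro s
      by_cases h : ',' ∈ s
      · have hlen := mySplit_length n (bPartition s).2
        simp only [bGo, mySplit, h, if_true, ih]
        simp only [List.length_cons, List.map_cons, List.map_append, List.map_replicate]
        have : n + 1 + 1 - ((mySplit n (bPartition s).2).length + 1) =
            n + 1 - (mySplit n (bPartition s).2).length := by omega
        simp [this, strip_nil]
      · have hb := bPartition_no_comma s h
        have hnil : bGo n ([] : List Char) =
            (mySplit n [] ++ List.replicate (n + 1 - (mySplit n []).length) []).map
              PySem.Chars.strip := ih []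
        have hms : mySplit n ([] : List Char) = [[]] := by
          cases n with
          | zero => rfl
          | succ k => simp [mySplit]
        rw [hms] at hnil
        simp only [bGo, hb, mySplit, h, if_false]
        rw [hnil]
        simp [strip_nil, List.replicate_succ]

-- ===== VERDICT (by name: the statement is the Claim_ definition above) =====
theorem split_row_limited_py_spec : Claim_equal_split_row_limited_py := by
  intro raw _
  unfold Spec_split_row_limited_py
  have hsplit : (PySem.Str.splitMax? raw "," (12 - 1)).getD [] =
      (mySplit 11 raw.toList).map String.ofList := by
    have hc : (",").toList = [','] := rfl
    simp [PySem.Str.splitMax?, PySem.Chars.splitMax?, hc, splitOnMax_eq]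
  have h121 : (12 : Nat) - 1 = 11 := rfl
  have hofnil : String.ofList ([] : List Char) = "" := rfl
  simp only [split_row_limited_py, split_row_limited_py_alt, hsplit, h121,
    bGo_eq 11 raw.toList, List.map_map]
  have hcomp : (PySem.Str.strip ∘ String.ofList) =
      (String.ofList ∘ PySem.Chars.strip) := by
    funext cs
    simp [PySem.Str.strip]
  rw [hcomp]
  set P := mySplit 11 raw.toList with hP
  have hlen : P.length ≤ 12 := mySplit_length 11 raw.toList
  have hlen' : (P.map (String.ofList ∘ PySem.Chars.strip)).length = P.length := by simp
  rw [if_neg (by omega : ¬ (P.map (String.ofList ∘ PySem.Chars.strip)).length > 12)]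
  simp only [List.map_append, List.map_replicate, strip_nil,
    Function.comp_apply, hofnil]
  by_cases hlt : P.length < 12
  · rw [if_pos (by omega : (P.map (String.ofList ∘ PySem.Chars.strip)).length < 12)]
    simp [hlen']
  · have h12 : P.length = 12 := by omega
    rw [if_neg (by omega : ¬ (P.map (String.ofList ∘ PySem.Chars.strip)).length < 12)]
    simp [h12]
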